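-- pv_equiv track=rewrite | github.com/ivi982010/SySdL-TPs | Lexer.py | a_PointComa
-- ===== SOURCE A (Python) =====
-- def a_PointComa (tokens, acu):
--     s = 0
--     for c in acu:
--         if c == ';':
--             s = 1
--         else:
--             s = -1
--     if s == 1:
--         tokens.append(("<SemiColon>", acu))
--     return (s == 1)
-- ===== SOURCE B (Python) =====
-- def a_PointComa(tokens, acu):
--     res = len(acu) > 0 and acu[-1] == ';'
--     if res:
--         tokens.append(("<SemiColon>", acu))
--     return res
-- ===== Notes on version B (the rewrite author's own statement) =====
-- stated objective: simpler
-- what changed: Replaces the O(n) scan that overwrites a flag on every character with an O(1) closed-form test of the last character (len(acu) > 0 and acu[-1] == ';').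
import Mathlib
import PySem

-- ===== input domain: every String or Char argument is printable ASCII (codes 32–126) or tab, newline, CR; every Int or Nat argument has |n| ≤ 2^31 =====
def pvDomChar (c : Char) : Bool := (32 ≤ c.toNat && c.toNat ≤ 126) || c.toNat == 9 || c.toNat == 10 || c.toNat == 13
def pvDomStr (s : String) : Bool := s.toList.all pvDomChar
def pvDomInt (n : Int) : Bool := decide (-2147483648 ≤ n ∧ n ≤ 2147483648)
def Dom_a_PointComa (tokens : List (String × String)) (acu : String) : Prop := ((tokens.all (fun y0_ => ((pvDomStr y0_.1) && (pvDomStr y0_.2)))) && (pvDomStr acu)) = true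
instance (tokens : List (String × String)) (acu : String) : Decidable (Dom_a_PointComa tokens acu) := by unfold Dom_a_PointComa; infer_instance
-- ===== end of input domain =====

-- B replaces A's per-character flag-overwriting scan by an O(1) test of the last character.
-- Note: the Python functions append to `tokens`; equivalence here is about the RETURN value only
-- (both Pythons perform the identical append exactly when the result is True).

-- ===== PORT A =====
-- s = 0; for c in acu: s = 1 if c == ';' else -1; return s == 1
def a_PointComa (tokens : List (String × String)) (acu : String) : Bool :=
  let s : Int := acu.toList.foldl (fun _ c => if c = ';' then 1 else -1) 0
  s == 1

-- ===== PORT B =====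
-- res = len(acu) > 0 and acu[-1] == ';'
def a_PointComa_alt (tokens : List (String × String)) (acu : String) : Bool :=
  PySem.Str.len acu > 0 && PySem.Str.pyGet? acu (-1) == some ';'

-- ===== PRECONDITION & SPEC =====
def Spec_a_PointComa (tokens : List (String × String)) (acu : String) (out : Bool) : Prop := out = a_PointComa_alt tokens acu
instance (tokens : List (String × String)) (acu : String) (out : Bool) : Decidable (Spec_a_PointComa tokens acu out) := by unfold Spec_a_PointComa; infer_instance

-- ===== CLAIM (what is proved, stated in full; the proofs are below) =====
def Claim_equal_a_PointComa : Prop := ∀ (tokens : List (String × String)) (acu : String), Dom_a_PointComa tokens acu → Spec_a_PointComa tokens acu (a_PointComa tokens acu)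

-- ===== LEMMAS AND PROOFS =====

-- The fold's state is overwritten at every step, so the final value is decided by the last char.
theorem pv_fold_last (l : List Char) :
    ((l.foldl (fun _ c => if c = ';' then (1 : Int) else -1) 0) == 1) =
    (l.getLast? == some ';') := by
  induction l using List.reverseRecOn with
  | nil => decide
  | append_singleton l c ih =>
    simp only [List.foldl_append, List.foldl_cons, List.foldl_nil, List.getLast?_concat]
    by_cases h : c = ';' <;> simp [h]

-- ===== VERDICT (by name: the statement is the Claim_ definition above) =====
theorem a_PointComa_spec : Claim_equal_a_PointComa := by
  intro tokens acu _
  unfold Spec_a_PointComa a_PointComa a_PointComa_alt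
  rw [pv_fold_last]
  cases h : acu.toList.getLast? with
  | none =>
    have hnil : acu.toList = [] := List.getLast?_eq_none_iff.mp h
    have hlen : acu.length = 0 := by
      have := congrArg List.length hnil; simpa using this
    simp [PySem.Str.pyGet?, PySem.Chars.pyGet?, PySem.List.pyGet?_neg_one, h, hlen]
  | some c =>
    have hne : acu.toList ≠ [] := by intro h'; rw [h'] at h; simp at h
    have hlen : 0 < acu.length := by
      have : 0 < acu.toList.length := List.length_pos_iff.mpr hne
      simpa using this
    simp [PySem.Str.pyGet?, PySem.Chars.pyGet?, PySem.List.pyGet?_neg_one, h, hlen]
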